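-- pv_equiv track=rewrite | github.com/rahdirs11/Geekster | Contests/14Feb/superBitString.py | superStrings
-- ===== SOURCE A (Python) =====
-- def superStrings(string):
--     if len(string) == 0:
--         return ['']
--
--     ch = string[0]
--     remaining = superStrings(string[1:])
--
--     current = []
--
--     for x in remaining:
--         current.append('1' + x)
--         if ch == '0':
--             current.append('0' + x)
--
--     return current
-- ===== SOURCE B (Python) =====
-- def superStrings(string):
--     z = string.count('0')
--     out = []
--     for i in range(2 ** z):
--         b = i
--         chars = []
--         for c in string:
--             if c == '0':
--                 chars.append('0' if b & 1 else '1')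
--                 b >>= 1
--             else:
--                 chars.append('1')
--         out.append(''.join(chars))
--     return out
-- ===== Notes on version B (the rewrite author's own statement) =====
-- stated objective: faster
-- what changed: Replaced the recursive suffix-expansion (which rebuilds the entire result list once per character) by direct bitmask enumeration: one output string per mask i in range(2**z), built in a single left-to-right pass consuming one bit of i at each free position.
import Mathlib
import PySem

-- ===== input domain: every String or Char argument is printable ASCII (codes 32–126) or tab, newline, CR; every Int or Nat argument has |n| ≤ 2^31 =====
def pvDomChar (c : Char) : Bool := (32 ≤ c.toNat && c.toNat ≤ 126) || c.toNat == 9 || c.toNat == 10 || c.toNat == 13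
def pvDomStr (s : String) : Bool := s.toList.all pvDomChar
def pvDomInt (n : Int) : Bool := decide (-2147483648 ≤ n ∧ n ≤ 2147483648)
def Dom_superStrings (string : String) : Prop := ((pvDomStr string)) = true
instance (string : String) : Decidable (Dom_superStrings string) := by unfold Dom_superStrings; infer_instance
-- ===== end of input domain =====

-- B replaces the suffix-expansion recursion by direct bitmask enumeration: for each i in
-- range(2^z) it builds one output string, consuming one bit of i at each '0' position
-- (objective: faster — no per-character rebuilding of the whole result list; same exact output order — leftmost free position is
-- the least significant bit, bit 0 ↦ '1', bit 1 ↦ '0').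

-- ===== PORT A =====
-- A: recursion on string[0] / string[1:]; the inner for-loop is a foldl over 'remaining';
-- strings handled as List Char, String.mk at the end.
def superStringsARec : List Char → List (List Char)
  | [] => [[]]
  | ch :: rest =>
      (superStringsARec rest).foldl (fun current x =>
        (current ++ [('1' :: x)]) ++ (if ch = '0' then [('0' :: x)] else [])) []

def superStrings (string : String) : List String :=
  (superStringsARec string.toList).map String.mk

-- ===== PORT B =====
-- B: one string per mask i, built by a single left-to-right pass that shifts i at each '0'.
def superStringsBuild (l : List Char) (b : Nat) : List Char :=
  match l with
  | [] => []
  | c :: rest =>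
      if c = '0' then (if b % 2 = 1 then '0' else '1') :: superStringsBuild rest (b / 2)
      else '1' :: superStringsBuild rest b

def superStrings_alt (string : String) : List String :=
  (List.range (2 ^ string.toList.count '0')).map
    (fun i => String.mk (superStringsBuild string.toList i))

-- ===== PRECONDITION & SPEC =====
def Spec_superStrings (string : String) (out : List String) : Prop := out = superStrings_alt string
instance (string : String) (out : List String) : Decidable (Spec_superStrings string out) := by unfold Spec_superStrings; infer_instance

-- ===== CLAIM (what is proved, stated in full; the proofs are below) =====
def Claim_equal_superStrings : Prop := ∀ (string : String), Dom_superStrings string → Spec_superStrings string (superStrings string)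

-- ===== LEMMAS AND PROOFS =====
lemma superStrings_foldl_flatMap (f g : List Char → List (List Char)) (L : List (List Char)) :
    L.foldl (fun cur x => cur ++ f x ++ g x) [] = L.flatMap (fun x => f x ++ g x) := by
  have h : ∀ (acc : List (List Char)), L.foldl (fun cur x => cur ++ f x ++ g x) acc
      = acc ++ L.flatMap (fun x => f x ++ g x) := by
    induction L with
    | nil => simp
    | cons y ys ih =>
        intro acc; rw [List.foldl_cons, ih]; simp [List.flatMap_cons]
  simpa using h []

lemma superStrings_flatMap_single (f : Nat → List Char) (l : List Nat) :
    l.flatMap (fun a => [f a]) = l.map f := by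
  induction l with | nil => rfl | cons x xs ih => simp [ih]

lemma superStrings_range_two_mul (m : Nat) :
    List.range (2 * m) = (List.range m).flatMap (fun j => [2 * j, 2 * j + 1]) := by
  induction m with
  | zero => rfl
  | succ m ih =>
      have h : 2 * (m + 1) = (2 * m + 1) + 1 := by ring
      rw [h, List.range_succ, List.range_succ, List.range_succ, ih]
      simp

lemma superStringsARec_eq_mask (l : List Char) :
    superStringsARec l = (List.range (2 ^ l.count '0')).map (superStringsBuild l) := by
  induction l with
  | nil => rfl
  | cons ch rest ih =>
      by_cases h : ch = '0'
      · subst h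
        rw [superStringsARec, superStrings_foldl_flatMap, ih]
        have hc : ('0' :: rest).count '0' = rest.count '0' + 1 := by simp
        rw [hc, pow_succ, mul_comm, superStrings_range_two_mul]
        rw [List.flatMap_map, List.map_flatMap]
        apply List.flatMap_congr
        intro j _
        have h1 : (2 * j) % 2 = 0 := by omega
        have h2 : (2 * j) / 2 = j := by omega
        have h3 : (2 * j + 1) % 2 = 1 := by omega
        have h4 : (2 * j + 1) / 2 = j := by omega
        simp [superStringsBuild, h1, h2, h3, h4]
      · rw [superStringsARec, superStrings_foldl_flatMap, ih]
        have hc : (ch :: rest).count '0' = rest.count '0' := by simp [h]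
        rw [hc, List.flatMap_map]
        simp only [if_neg h, List.append_nil]
        rw [superStrings_flatMap_single (fun a => '1' :: superStringsBuild rest a)]
        apply List.map_congr_left
        intro j _
        simp [superStringsBuild, h]

-- ===== VERDICT (by name: the statement is the Claim_ definition above) =====
theorem superStrings_spec : Claim_equal_superStrings := by
  intro string _
  unfold Spec_superStrings superStrings superStrings_alt
  rw [superStringsARec_eq_mask, List.map_map]
  rfl
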